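-- pv_equiv track=rewrite | github.com/ikramulkayes/Python_season2 | 2/func9.py | stringfixer
-- ===== SOURCE A (Python) =====
-- def stringfixer(sentence):
--     sentence = sentence.split()
--     symbollst = [".","!","?"]
--     flag = False
--     count = 0
--     final  = ""
--     for elm in sentence:
--         if count ==0:
--             elm = elm.capitalize()
--             count += 1
--         if flag:
--             elm = elm.capitalize()
--             flag = False
--         for letter in elm:
--             if letter in symbollst:
--                 flag = True
--         if elm == "i":
--             elm = elm.capitalize()
--         elif "i" in elm:
--             if len(elm) == 2:
--                 if elm[1] in symbollst:
--                     elm = elm.capitalize()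
--         final += elm + " "
--     final = final.rstrip()
--     return final
-- ===== SOURCE B (Python) =====
-- def stringfixer(sentence):
--     words = sentence.split()
--     syms = ".!?"
--
--     # stage 1: group words into sentence chunks; a chunk ends at a word containing punctuation
--     chunks = []
--     cur = []
--     for w in words:
--         cur.append(w)
--         if any(ch in syms for ch in w):
--             chunks.append(cur)
--             cur = []
--     if cur:
--         chunks.append(cur)
--
--     # stage 2: capitalize the first word of each chunk
--     fixed = [[c[0].capitalize()] + c[1:] for c in chunks]
--
--     # stage 3: the i-rule, applied to every word
--     def irule(w):
--         if w == "i":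
--             return w.capitalize()
--         if "i" in w and len(w) == 2 and w[1] in syms:
--             return w.capitalize()
--         return w
--
--     return " ".join(irule(w) for c in fixed for w in c)
-- ===== Notes on version B (the rewrite author's own statement) =====
-- stated objective: alternative
-- what changed: Replaces A's single stateful pass (carried flag/count and string concatenation with a final rstrip) by three staged passes over a different intermediate structure: group the words into sentence chunks ending at a punctuation-bearing word, capitalize the head of each chunk, then map the i-rule over all words and space-join.
import Mathlib
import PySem

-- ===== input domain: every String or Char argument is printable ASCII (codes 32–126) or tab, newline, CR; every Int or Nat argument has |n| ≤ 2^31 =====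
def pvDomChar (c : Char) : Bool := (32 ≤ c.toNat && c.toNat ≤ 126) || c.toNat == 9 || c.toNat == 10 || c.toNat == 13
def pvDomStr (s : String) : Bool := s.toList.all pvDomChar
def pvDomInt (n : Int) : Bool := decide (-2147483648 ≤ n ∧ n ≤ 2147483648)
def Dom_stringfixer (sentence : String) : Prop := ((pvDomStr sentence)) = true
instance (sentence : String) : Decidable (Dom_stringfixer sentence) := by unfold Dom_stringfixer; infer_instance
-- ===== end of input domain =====

-- B replaces A's single stateful pass (flag/count, string concatenation, final rstrip) by three
-- staged passes: group words into sentence chunks, capitalize each chunk head, map the i-rule,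
-- then space-join (alternative decomposition; same asymptotic cost).

-- Python's str.capitalize() (exact on the ASCII domain): first char uppercased, rest lowered.
-- Shared by both ports because both Pythons call .capitalize().
def pvCap (w : List Char) : List Char :=
  match w with
  | [] => []
  | c :: cs => PySem.Chars.upperChar c :: PySem.Chars.lower cs

-- ===== PORT A =====
def pvSymsA : List Char := ['.', '!', '?']

def pvStepA (st : Bool × Nat × List Char) (elm : List Char) : Bool × Nat × List Char :=
  let flag := st.1
  let count := st.2.1
  let final := st.2.2
  let elm1 := if count = 0 then pvCap elm else elm
  let count1 := if count = 0 then count + 1 else count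
  let elm2 := if flag then pvCap elm1 else elm1
  let flag1 := if flag then false else flag
  let flag2 := elm2.foldl (fun f letter => if pvSymsA.contains letter then true else f) flag1
  let elm3 :=
    if elm2 = ['i'] then pvCap elm2
    else if PySem.Chars.isIn ['i'] elm2 then
      if elm2.length = 2 then
        if (match PySem.List.pyGet? elm2 1 with
            | some c => pvSymsA.contains c
            | none => false) then pvCap elm2 else elm2
      else elm2
    else elm2
  (flag2, count1, final ++ elm3 ++ [' '])

def stringfixer (sentence : String) : String :=
  let ws := PySem.Chars.split₀ sentence.toList
  let st := ws.foldl pvStepA (false, 0, [])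
  String.ofList (PySem.Chars.rstrip st.2.2)

-- ===== PORT B =====
def pvSymsB : List Char := ['.', '!', '?']

def pvAnySymB (w : List Char) : Bool := w.any (fun ch => pvSymsB.contains ch)

-- stage 1: group words into sentence chunks; a chunk ends at a word containing punctuation
def pvChunkGo (cur : List (List Char)) : List (List Char) → List (List (List Char))
  | [] => if cur.isEmpty then [] else [cur]
  | w :: ws =>
      let cur' := cur ++ [w]
      if pvAnySymB w then cur' :: pvChunkGo [] ws else pvChunkGo cur' ws

-- stage 2: capitalize the first word of a chunk (chunks built by pvChunkGo are never empty,
-- so the [] case is unreachable — it mirrors Python's c[0] on a nonempty list)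
def pvCapHead (c : List (List Char)) : List (List Char) :=
  match c with
  | [] => []
  | h :: t => pvCap h :: t

-- stage 3: the i-rule
def pvIRuleB (w : List Char) : List Char :=
  if w = ['i'] then pvCap w
  else if (PySem.Chars.isIn ['i'] w && decide (w.length = 2) &&
           (match PySem.List.pyGet? w 1 with
            | some c => pvSymsB.contains c
            | none => false)) then pvCap w
  else w

def stringfixer_alt (sentence : String) : String :=
  let words := PySem.Chars.split₀ sentence.toList
  let chunks := pvChunkGo [] words
  let fixed := chunks.map pvCapHead
  String.ofList (PySem.Chars.join [' '] ((fixed.flatten).map pvIRuleB))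

-- ===== PRECONDITION & SPEC =====
def Spec_stringfixer (sentence : String) (out : String) : Prop := out = stringfixer_alt sentence
instance (sentence : String) (out : String) : Decidable (Spec_stringfixer sentence out) := by unfold Spec_stringfixer; infer_instance

-- ===== CLAIM =====
def Claim_equal_stringfixer : Prop := ∀ (sentence : String), Dom_stringfixer sentence → Spec_stringfixer sentence (stringfixer sentence)

-- ===== LEMMAS AND PROOFS =====

-- canonical middle form of the per-word processing
def pvIRule (w : List Char) : List Char :=
  if w = ['i'] then pvCap w
  else if PySem.Chars.isIn ['i'] w then
    if w.length = 2 then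
      if (match PySem.List.pyGet? w 1 with
          | some c => pvSymsA.contains c
          | none => false) then pvCap w else w
    else w
  else w

def pvAnySym (w : List Char) : Bool := w.any (fun c => pvSymsA.contains c)

def pvCanonWord (b : Bool) (w : List Char) : List Char := pvIRule (if b then pvCap w else w)

def pvCanon : Bool → List (List Char) → List (List Char)
  | _, [] => []
  | b, w :: ws => pvCanonWord b w :: pvCanon (pvAnySym w) ws

-- capitalize-only middle stage (B's stages 1–2 compute this)
def pvMapCap : Bool → List (List Char) → List (List Char)
  | _, [] => []
  | b, w :: ws => (if b then pvCap w else w) :: pvMapCap (pvAnySym w) ws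

def pvFlatSp (l : List (List Char)) : List Char := l.flatMap (fun w => w ++ [' '])

def pvGoodW (w : List Char) : Prop := w ≠ [] ∧ ∀ c ∈ w, PySem.Chars.isspace c = false

-- character facts
theorem pv_ofNat_toNat (n : Nat) (hv : n.isValidChar) : (Char.ofNat n).toNat = n := by
  unfold Char.ofNat; rw [dif_pos hv]; rfl

theorem pv_char_eq_iff (c d : Char) : c = d ↔ c.toNat = d.toNat := by
  constructor
  · intro h; rw [h]
  · intro h; exact Char.ext (UInt32.toNat_inj.mp h)

theorem pv_upperChar_toNat (c : Char) (h : PySem.Chars.islower c = true) :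
    (PySem.Chars.upperChar c).toNat = c.toNat - 32 ∧ 97 ≤ c.toNat ∧ c.toNat ≤ 122 := by
  have hb : 97 ≤ c.toNat ∧ c.toNat ≤ 122 := by
    simpa only [PySem.Chars.islower, Bool.and_eq_true, decide_eq_true_eq, Char.le_def] using h
  refine ⟨?_, hb⟩
  simp only [PySem.Chars.upperChar, h, if_true]
  exact pv_ofNat_toNat _ (Or.inl (by omega))

theorem pv_lowerChar_toNat (c : Char) (h : PySem.Chars.isupper c = true) :
    (PySem.Chars.lowerChar c).toNat = c.toNat + 32 ∧ 65 ≤ c.toNat ∧ c.toNat ≤ 90 := by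
  have hb : 65 ≤ c.toNat ∧ c.toNat ≤ 90 := by
    simpa only [PySem.Chars.isupper, Bool.and_eq_true, decide_eq_true_eq, Char.le_def] using h
  refine ⟨?_, hb⟩
  simp only [PySem.Chars.lowerChar, h, if_true]
  exact pv_ofNat_toNat _ (Or.inl (by omega))

theorem pv_contains_of_toNat_letter (c : Char) (h : 65 ≤ c.toNat) (h2 : c.toNat ≤ 122) :
    pvSymsA.contains c = false := by
  simp only [pvSymsA, List.contains_cons, List.contains_nil, Bool.or_eq_false_iff, beq_eq_false_iff_ne]
  refine ⟨?_, ?_, ?_, trivial⟩ <;> (intro he; rw [pv_char_eq_iff] at he; simp at he; omega)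

theorem pv_contains_upperChar (c : Char) : pvSymsA.contains (PySem.Chars.upperChar c) = pvSymsA.contains c := by
  by_cases h : PySem.Chars.islower c = true
  · obtain ⟨h1, h2, h3⟩ := pv_upperChar_toNat c h
    rw [pv_contains_of_toNat_letter _ (by omega) (by omega),
        pv_contains_of_toNat_letter c (by omega) (by omega)]
  · simp only [PySem.Chars.upperChar, if_neg h]

theorem pv_contains_lowerChar (c : Char) : pvSymsA.contains (PySem.Chars.lowerChar c) = pvSymsA.contains c := by
  by_cases h : PySem.Chars.isupper c = true
  · obtain ⟨h1, h2, h3⟩ := pv_lowerChar_toNat c h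
    rw [pv_contains_of_toNat_letter _ (by omega) (by omega),
        pv_contains_of_toNat_letter c (by omega) (by omega)]
  · simp only [PySem.Chars.lowerChar, if_neg h]

theorem pv_isspace_upperChar (c : Char) (h : PySem.Chars.isspace c = false) :
    PySem.Chars.isspace (PySem.Chars.upperChar c) = false := by
  by_cases hl : PySem.Chars.islower c = true
  · obtain ⟨h1, h2, h3⟩ := pv_upperChar_toNat c hl
    simp only [PySem.Chars.isspace]
    simp only [Bool.or_eq_false_iff, Bool.and_eq_false_iff, decide_eq_false_iff_not]
    omega
  · simpa only [PySem.Chars.upperChar, if_neg hl] using h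

theorem pv_isspace_lowerChar (c : Char) (h : PySem.Chars.isspace c = false) :
    PySem.Chars.isspace (PySem.Chars.lowerChar c) = false := by
  by_cases hl : PySem.Chars.isupper c = true
  · obtain ⟨h1, h2, h3⟩ := pv_lowerChar_toNat c hl
    simp only [PySem.Chars.isspace]
    simp only [Bool.or_eq_false_iff, Bool.and_eq_false_iff, decide_eq_false_iff_not]
    omega
  · simpa only [PySem.Chars.lowerChar, if_neg hl] using h

-- cap / iRule preserve the symbol profile and goodness
theorem pv_anySym_lower (t : List Char) :
    (PySem.Chars.lower t).any (fun c => pvSymsA.contains c) = t.any (fun c => pvSymsA.contains c) := by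
  induction t with
  | nil => rfl
  | cons c t ih =>
      simp only [PySem.Chars.lower, List.map_cons, List.any_cons] at *
      rw [pv_contains_lowerChar, ih]

theorem pv_anySym_cap (w : List Char) : pvAnySym (pvCap w) = pvAnySym w := by
  cases w with
  | nil => rfl
  | cons c t =>
      simp only [pvAnySym, pvCap, List.any_cons]
      rw [pv_contains_upperChar, pv_anySym_lower]

theorem pv_good_cap (w : List Char) (h : pvGoodW w) : pvGoodW (pvCap w) := by
  obtain ⟨hne, hs⟩ := h
  cases w with
  | nil => exact absurd rfl hne
  | cons c t =>
      refine ⟨by simp [pvCap], ?_⟩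
      intro x hx
      simp only [pvCap, List.mem_cons] at hx
      rcases hx with h1 | h2
      · exact h1 ▸ pv_isspace_upperChar c (hs c (List.mem_cons_self))
      · simp only [PySem.Chars.lower, List.mem_map] at h2
        obtain ⟨y, hy, hyx⟩ := h2
        exact hyx ▸ pv_isspace_lowerChar y (hs y (List.mem_cons_of_mem _ hy))

theorem pv_good_iRule (w : List Char) (h : pvGoodW w) : pvGoodW (pvIRule w) := by
  unfold pvIRule
  split_ifs <;> first | exact pv_good_cap w h | exact h

theorem pv_good_canonWord (b : Bool) (w : List Char) (h : pvGoodW w) : pvGoodW (pvCanonWord b w) := by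
  unfold pvCanonWord
  cases b
  · exact pv_good_iRule w h
  · exact pv_good_iRule _ (pv_good_cap w h)

-- split₀ produces nonempty whitespace-free words
theorem pv_split₀_go_good (s cur : List Char) (acc : List (List Char))
    (hcur : ∀ c ∈ cur, PySem.Chars.isspace c = false)
    (hacc : ∀ w ∈ acc, pvGoodW w) :
    ∀ w ∈ PySem.Chars.split₀.go s cur acc, pvGoodW w := by
  induction s generalizing cur acc with
  | nil =>
      intro w hw
      unfold PySem.Chars.split₀.go at hw
      by_cases hc : cur.isEmpty = true
      · rw [if_pos hc, List.mem_reverse] at hw; exact hacc w hw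
      · rw [if_neg hc, List.mem_reverse, List.mem_cons] at hw
        rcases hw with h1 | h2
        · subst h1
          exact ⟨by simpa [List.isEmpty_iff] using hc, fun c hc' => hcur c (List.mem_reverse.mp hc')⟩
        · exact hacc w h2
  | cons c rest ih =>
      intro w hw
      unfold PySem.Chars.split₀.go at hw
      by_cases hs : PySem.Chars.isspace c = true
      · rw [if_pos hs] at hw
        by_cases hc : cur.isEmpty = true
        · rw [if_pos hc] at hw
          exact ih [] acc (by simp) hacc w hw
        · rw [if_neg hc] at hw
          refine ih [] (cur.reverse :: acc) (by simp) ?_ w hw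
          intro v hv
          rcases List.mem_cons.mp hv with h1 | h2
          · subst h1
            exact ⟨by simpa [List.isEmpty_iff] using hc, fun x hx => hcur x (List.mem_reverse.mp hx)⟩
          · exact hacc v h2
      · rw [if_neg hs] at hw
        refine ih (c :: cur) acc ?_ hacc w hw
        intro x hx
        rcases List.mem_cons.mp hx with h1 | h2
        · exact h1 ▸ Bool.not_eq_true _ ▸ (by simpa using hs)
        · exact hcur x h2

theorem pv_split₀_good (s : List Char) : ∀ w ∈ PySem.Chars.split₀ s, pvGoodW w :=
  pv_split₀_go_good s [] [] (by simp) (by simp)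

-- the A-side loop computes pvCanon
theorem pv_foldl_any (xs : List Char) (f0 : Bool) :
    xs.foldl (fun f letter => if pvSymsA.contains letter then true else f) f0
      = (f0 || xs.any (fun c => pvSymsA.contains c)) := by
  induction xs generalizing f0 with
  | nil => simp
  | cons c t ih =>
      simp only [List.foldl_cons, List.any_cons, ih]
      by_cases h : pvSymsA.contains c = true <;> simp [Bool.or_comm, Bool.or_assoc]

theorem pv_stepA_eq (flag : Bool) (acc w : List Char) :
    pvStepA (flag, 1, acc) w = (pvAnySym w, 1, acc ++ pvCanonWord flag w ++ [' ']) := by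
  cases flag
  · simp only [pvStepA, Bool.false_eq_true, if_false, pv_foldl_any, Bool.false_or]
    rfl
  · simp only [pvStepA, if_true, pv_foldl_any, Bool.false_or]
    show (pvAnySym (pvCap w), 1, _) = _
    rw [pv_anySym_cap]
    rfl

theorem pv_foldA (ws : List (List Char)) (flag : Bool) (acc : List Char) :
    (ws.foldl pvStepA (flag, 1, acc)).2.2 = acc ++ pvFlatSp (pvCanon flag ws) := by
  induction ws generalizing flag acc with
  | nil => simp [pvCanon, pvFlatSp]
  | cons w ws ih =>
      rw [List.foldl_cons, pv_stepA_eq, ih]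
      simp [pvCanon, pvFlatSp]

theorem pv_A_char (ws : List (List Char)) :
    (ws.foldl pvStepA (false, 0, [])).2.2 = pvFlatSp (pvCanon true ws) := by
  cases ws with
  | nil => simp [pvCanon, pvFlatSp]
  | cons w ws =>
      rw [List.foldl_cons]
      have hstep : pvStepA (false, 0, []) w = (pvAnySym w, 1, pvCanonWord true w ++ [' ']) := by
        simp only [pvStepA, Bool.false_eq_true, if_false, pv_foldl_any, Bool.false_or]
        show (pvAnySym (pvCap w), 1, _) = _
        rw [pv_anySym_cap]
        rfl
      rw [hstep, pv_foldA]
      simp [pvCanon, pvFlatSp]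

-- B's stages 1–2 compute pvMapCap
theorem pv_capHead_append (cur : List (List Char)) (w : List Char) (h : cur ≠ []) :
    pvCapHead (cur ++ [w]) = pvCapHead cur ++ [w] := by
  cases cur with
  | nil => exact absurd rfl h
  | cons a t => simp [pvCapHead]

theorem pv_chunk_flatten (ws cur : List (List Char)) :
    ((pvChunkGo cur ws).map pvCapHead).flatten = pvCapHead cur ++ pvMapCap cur.isEmpty ws := by
  induction ws generalizing cur with
  | nil =>
      by_cases h : cur.isEmpty = true
      · simp [pvChunkGo, pvMapCap, List.isEmpty_iff.mp h, pvCapHead]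
      · simp [pvChunkGo, h, pvMapCap]
  | cons w ws ih =>
      have hsym : pvAnySymB w = pvAnySym w := rfl
      by_cases he : cur = []
      · subst he
        by_cases hs : pvAnySymB w = true
        · simp only [pvChunkGo, hs, if_true, List.map_cons, List.flatten_cons, ih]
          simp [pvCapHead, pvMapCap, pvCap, ← hsym, hs]
        · have hs' : pvAnySymB w = false := by simpa using hs
          simp only [pvChunkGo, hs', Bool.false_eq_true, if_false]
          rw [show ([] : List (List Char)) ++ [w] = [w] from rfl, ih]
          simp only [Bool.not_eq_true] at hs
          simp [pvCapHead, pvMapCap, ← hsym, hs]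
      · have hne : cur.isEmpty = false := by simpa [List.isEmpty_iff] using he
        by_cases hs : pvAnySymB w = true
        · simp only [pvChunkGo, hs, if_true, List.map_cons, List.flatten_cons, ih]
          rw [pv_capHead_append cur w he]
          simp [pvCapHead, pvMapCap, hne, ← hsym, hs]
        · have hs' : pvAnySymB w = false := by simpa using hs
          simp only [pvChunkGo, hs', Bool.false_eq_true, if_false]
          rw [ih]
          rw [pv_capHead_append cur w he]
          have : (cur ++ [w]).isEmpty = false := by simp
          rw [this]
          simp only [Bool.not_eq_true] at hs
          simp [pvMapCap, hne, ← hsym, hs]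

-- stage 3 maps pvIRule, and mapping it over pvMapCap gives pvCanon
theorem pv_iRuleB_eq (w : List Char) : pvIRuleB w = pvIRule w := by
  have hsyms : pvSymsB = pvSymsA := rfl
  simp only [pvIRuleB, pvIRule, hsyms]
  split_ifs <;> simp_all

theorem pv_map_iRule_mapCap (b : Bool) (ws : List (List Char)) :
    (pvMapCap b ws).map pvIRuleB = pvCanon b ws := by
  induction ws generalizing b with
  | nil => rfl
  | cons w ws ih =>
      simp only [pvMapCap, pvCanon, List.map_cons, ih, pv_iRuleB_eq, pvCanonWord]

theorem pv_B_char (ws : List (List Char)) :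
    (((pvChunkGo [] ws).map pvCapHead).flatten).map pvIRuleB = pvCanon true ws := by
  rw [pv_chunk_flatten]
  simp only [pvCapHead, List.isEmpty_nil, List.nil_append]
  exact pv_map_iRule_mapCap true ws

-- joining glue
theorem pv_join_append_singleton (l : List (List Char)) (w : List Char) :
    PySem.Chars.join [' '] (l ++ [w]) = pvFlatSp l ++ w := by
  induction l with
  | nil => simp [PySem.Chars.join, pvFlatSp, List.intercalate]
  | cons a l ih =>
      cases l with
      | nil =>
          simp [PySem.Chars.join, pvFlatSp, List.intercalate, List.intersperse]
      | cons b l' =>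
          rw [List.cons_append]
          have hcc : ∀ (x y : List Char) (r : List (List Char)),
              PySem.Chars.join [' '] (x :: y :: r) = x ++ [' '] ++ PySem.Chars.join [' '] (y :: r) := by
            intro x y r
            simp [PySem.Chars.join, List.intercalate, List.intersperse]
          rw [List.cons_append] at ih ⊢
          rw [hcc, ih]
          simp [pvFlatSp]

theorem pv_rstrip_flatSp (l : List (List Char)) (h : ∀ w ∈ l, pvGoodW w) :
    PySem.Chars.rstrip (pvFlatSp l) = PySem.Chars.join [' '] l := by
  induction l using List.reverseRecOn with
  | nil => rfl
  | append_singleton l w ih =>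
      have hw : pvGoodW w := h w (by simp)
      have hflat : pvFlatSp (l ++ [w]) = pvFlatSp l ++ (w ++ [' ']) := by
        simp [pvFlatSp]
      rw [pv_join_append_singleton, hflat]
      obtain ⟨hne, hs⟩ := hw
      obtain ⟨c, t, hct⟩ : ∃ c t, w.reverse = c :: t := by
        cases hrev : w.reverse with
        | nil => exact absurd (by simpa using hrev) hne
        | cons c t => exact ⟨c, t, rfl⟩
      have hc : PySem.Chars.isspace c = false :=
        hs c (List.mem_reverse.mp (hct ▸ List.mem_cons_self))
      unfold PySem.Chars.rstrip
      rw [List.reverse_append, List.reverse_append, hct]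
      simp only [List.reverse_cons, List.reverse_nil, List.nil_append, List.singleton_append]
      simp only [List.cons_append]
      rw [List.dropWhile_cons_of_pos (show PySem.Chars.isspace ' ' = true from by decide),
          List.dropWhile_cons_of_neg (show ¬ PySem.Chars.isspace c = true from by simp [hc])]
      have hrw : c :: (t ++ (pvFlatSp l).reverse) = w.reverse ++ (pvFlatSp l).reverse := by
        rw [hct]; rfl
      rw [hrw]
      simp

-- main
theorem pv_main (sentence : String) : stringfixer sentence = stringfixer_alt sentence := by
  simp only [stringfixer, stringfixer_alt]
  rw [pv_A_char, pv_B_char, pv_rstrip_flatSp]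
  -- goodness of the canon words
  intro w hw
  have : ∀ (b : Bool) (ws : List (List Char)), (∀ v ∈ ws, pvGoodW v) → ∀ u ∈ pvCanon b ws, pvGoodW u := by
    intro b ws
    induction ws generalizing b with
    | nil => intro _ u hu; cases hu
    | cons v ws ih =>
        intro hws u hu
        rcases List.mem_cons.mp hu with h1 | h2
        · exact h1 ▸ pv_good_canonWord b v (hws v List.mem_cons_self)
        · exact ih _ (fun x hx => hws x (List.mem_cons_of_mem _ hx)) u h2
  exact this true _ (pv_split₀_good sentence.toList) w hw

-- ===== VERDICT =====
theorem stringfixer_spec : Claim_equal_stringfixer := by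
  intro sentence _
  exact pv_main sentence
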